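-- pv_equiv track=rewrite | github.com/d0sboots/HackNet | password.py | get_hash_code_internal
-- ===== SOURCE A (Python) =====
-- def do_one_hash(hash_val, int_val):
--     """Computes the primitive hash operation."""
--     hash_val = ((hash_val << 5) + hash_val + (hash_val >> 27)) & 0xFFFFFFFF
--     hash_val ^= int_val
--     if hash_val >= 0x80000000:
--         hash_val -= 0x100000000
--     return hash_val
--
-- def get_hash_code_internal(ints_list, ints_len):
--     """Actual implementation of the hashing algorithm.
--
--     This takes a list of integers and a length, so that the list doesn't
--     need to be resized to change lengths.
--     """
--     hash1 = 352654597 #(5381<<16) + 5381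
--     hash2 = hash1
--
--     off = 0
--     while off <= ints_len - 2:
--         hash1 = do_one_hash(hash1, ints_list[off])
--         hash2 = do_one_hash(hash2, ints_list[off+1])
--         off += 2
--
--     if off <= ints_len - 1:
--         hash1 = do_one_hash(hash1, ints_list[off])
--     return (hash1 + (hash2 * 1566083941)) & 0xFFFFFFFF
-- ===== SOURCE B (Python) =====
-- def do_one_hash(hash_val, int_val):
--     """Computes the primitive hash operation."""
--     hash_val = ((hash_val << 5) + hash_val + (hash_val >> 27)) & 0xFFFFFFFF
--     hash_val ^= int_val
--     if hash_val >= 0x80000000: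
--         hash_val -= 0x100000000
--     return hash_val
--
-- def get_hash_code_internal(ints_list, ints_len):
--     """Two independent single-stride passes: hash1 eats the even-indexed
--     elements, hash2 the odd-indexed ones; the interleaved pair loop plus
--     tail fixup of the original collapses into two plain for-loops."""
--     hash1 = 352654597
--     hash2 = 352654597
--     for i in range(0, ints_len, 2):
--         hash1 = do_one_hash(hash1, ints_list[i])
--     for i in range(1, ints_len, 2):
--         hash2 = do_one_hash(hash2, ints_list[i])
--     return (hash1 + (hash2 * 1566083941)) & 0xFFFFFFFF
-- ===== Notes on version B (the rewrite author's own statement) =====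
-- stated objective: alternative
-- what changed: Replaces A's interleaved stride-2 pair loop with odd-tail fixup by two independent single-stride passes: one fold over the even indices for hash1, one over the odd indices for hash2, exploiting that the two hash chains never interact.
import Mathlib
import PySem

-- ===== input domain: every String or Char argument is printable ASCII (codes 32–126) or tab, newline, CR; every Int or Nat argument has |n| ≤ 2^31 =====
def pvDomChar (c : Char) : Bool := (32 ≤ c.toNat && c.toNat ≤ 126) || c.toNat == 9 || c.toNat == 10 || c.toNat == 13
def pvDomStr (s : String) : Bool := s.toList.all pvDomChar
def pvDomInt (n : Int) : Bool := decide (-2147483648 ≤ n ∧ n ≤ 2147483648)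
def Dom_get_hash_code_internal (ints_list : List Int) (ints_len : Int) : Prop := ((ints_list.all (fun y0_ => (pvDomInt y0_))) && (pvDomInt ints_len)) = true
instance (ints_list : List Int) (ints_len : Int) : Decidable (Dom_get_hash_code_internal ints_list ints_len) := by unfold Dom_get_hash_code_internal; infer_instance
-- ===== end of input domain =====

-- B replaces A's interleaved stride-2 pair loop (plus odd-tail fixup) by two independent
-- single-stride passes over the even- and odd-indexed elements; same return value.

-- ===== PORT A =====
def do_one_hash (hash_val : Int) (int_val : Int) : Int :=
  let h := PySem.Int.band ((hash_val <<< (5:Nat)) + hash_val + (hash_val >>> (27:Nat))) 4294967295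
  let h := PySem.Int.bxor h int_val
  if h ≥ 2147483648 then h - 4294967296 else h

-- A's while-loop; pyGetD's default 0 is never reached under Pre_ (Python raises IndexError there)
def hash_loop_a (ints_list : List Int) (ints_len : Int) (off hash1 hash2 : Int) : Int × Int × Int :=
  if off ≤ ints_len - 2 then
    hash_loop_a ints_list ints_len (off + 2)
      (do_one_hash hash1 (PySem.List.pyGetD ints_list off 0))
      (do_one_hash hash2 (PySem.List.pyGetD ints_list (off + 1) 0))
  else (hash1, hash2, off)
termination_by (ints_len - off).toNat
decreasing_by omega

def get_hash_code_internal (ints_list : List Int) (ints_len : Int) : Int :=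
  let r := hash_loop_a ints_list ints_len 0 352654597 352654597
  let hash1 := r.1
  let hash2 := r.2.1
  let off := r.2.2
  let hash1 := if off ≤ ints_len - 1 then do_one_hash hash1 (PySem.List.pyGetD ints_list off 0) else hash1
  PySem.Int.band (hash1 + hash2 * 1566083941) 4294967295

-- ===== PORT B =====
def get_hash_code_internal_alt (ints_list : List Int) (ints_len : Int) : Int :=
  let hash1 := (PySem.List.pyRange 0 ints_len 2).foldl
      (fun h i => do_one_hash h (PySem.List.pyGetD ints_list i 0)) 352654597
  let hash2 := (PySem.List.pyRange 1 ints_len 2).foldl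
      (fun h i => do_one_hash h (PySem.List.pyGetD ints_list i 0)) 352654597
  PySem.Int.band (hash1 + hash2 * 1566083941) 4294967295

-- ===== PRECONDITION & SPEC =====
-- Both Pythons raise IndexError exactly when ints_len exceeds the list length (and ints_len ≥ 1);
-- Pre_ excludes precisely those inputs.
def Pre_get_hash_code_internal (ints_list : List Int) (ints_len : Int) : Prop :=
  ints_len ≤ (ints_list.length : Int) ∨ ints_len ≤ 0
instance (ints_list : List Int) (ints_len : Int) : Decidable (Pre_get_hash_code_internal ints_list ints_len) := by
  unfold Pre_get_hash_code_internal; infer_instance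

def pvWitness_get_hash_code_internal : List Int × Int := ([1, 2, 3], 3)

def Spec_get_hash_code_internal (ints_list : List Int) (ints_len : Int) (out : Int) : Prop := out = get_hash_code_internal_alt ints_list ints_len
instance (ints_list : List Int) (ints_len : Int) (out : Int) : Decidable (Spec_get_hash_code_internal ints_list ints_len out) := by unfold Spec_get_hash_code_internal; infer_instance

-- ===== CLAIM (what is proved, stated in full; the proofs are below) =====
def Claim_equal_get_hash_code_internal : Prop := ∀ (ints_list : List Int) (ints_len : Int), Dom_get_hash_code_internal ints_list ints_len → Pre_get_hash_code_internal ints_list ints_len → Spec_get_hash_code_internal ints_list ints_len (get_hash_code_internal ints_list ints_len)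

-- ===== LEMMAS AND PROOFS =====

theorem pyRange2_nil (a b : Int) (h : b ≤ a) : PySem.List.pyRange a b 2 = [] := by
  rw [PySem.List.pyRange_of_pos a b (by norm_num)]
  simp [show ¬ a < b by omega]

theorem pyRange2_cons (a b : Int) (h : a < b) :
    PySem.List.pyRange a b 2 = a :: PySem.List.pyRange (a + 2) b 2 := by
  rw [PySem.List.pyRange_of_pos a b (by norm_num),
      PySem.List.pyRange_of_pos (a + 2) b (by norm_num)]
  by_cases h2 : a + 2 < b
  · have hc : ((b - a + 2 - 1) / 2).toNat = ((b - (a + 2) + 2 - 1) / 2).toNat + 1 := by omega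
    rw [if_pos h, if_pos h2, hc, List.range_succ_eq_map]
    simp only [List.map_cons, List.map_map]
    congr 1
    · norm_num
    · apply List.map_congr_left
      intro k _
      simp only [Function.comp]
      push_cast
      ring
  · have hc : ((b - a + 2 - 1) / 2).toNat = 1 := by omega
    rw [if_pos h, if_neg h2, hc]
    simp

-- the invariant: A's loop followed by its odd-tail fixup equals the two strided folds of B
theorem loop_eq (ints_list : List Int) (ints_len : Int) (k : Nat) :
    ∀ off hash1 hash2, (ints_len - off).toNat = k →
    ((if (hash_loop_a ints_list ints_len off hash1 hash2).2.2 ≤ ints_len - 1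
        then do_one_hash (hash_loop_a ints_list ints_len off hash1 hash2).1
               (PySem.List.pyGetD ints_list (hash_loop_a ints_list ints_len off hash1 hash2).2.2 0)
        else (hash_loop_a ints_list ints_len off hash1 hash2).1)
      = (PySem.List.pyRange off ints_len 2).foldl
          (fun h i => do_one_hash h (PySem.List.pyGetD ints_list i 0)) hash1)
    ∧ (hash_loop_a ints_list ints_len off hash1 hash2).2.1
      = (PySem.List.pyRange (off + 1) ints_len 2).foldl
          (fun h i => do_one_hash h (PySem.List.pyGetD ints_list i 0)) hash2 := by
  induction k using Nat.strong_induction_on with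
  | _ k ih =>
    intro off hash1 hash2 hk
    rw [hash_loop_a]
    by_cases hoff : off ≤ ints_len - 2
    · simp only [if_pos hoff]
      obtain ⟨ih1, ih2⟩ := ih ((ints_len - (off + 2)).toNat) (by omega) (off + 2)
        (do_one_hash hash1 (PySem.List.pyGetD ints_list off 0))
        (do_one_hash hash2 (PySem.List.pyGetD ints_list (off + 1) 0)) rfl
      rw [pyRange2_cons off ints_len (by omega), pyRange2_cons (off + 1) ints_len (by omega)]
      simp only [List.foldl_cons]
      rw [show off + 2 + 1 = off + 1 + 2 by ring] at ih2
      exact ⟨ih1, ih2⟩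
    · simp only [if_neg hoff]
      by_cases htail : off ≤ ints_len - 1
      · rw [if_pos htail, pyRange2_cons off ints_len (by omega),
            pyRange2_nil (off + 2) ints_len (by omega),
            pyRange2_nil (off + 1) ints_len (by omega)]
        simp
      · rw [if_neg htail, pyRange2_nil off ints_len (by omega),
            pyRange2_nil (off + 1) ints_len (by omega)]
        simp

-- ===== VERDICT (by name: the statement is the Claim_ definition above) =====
theorem get_hash_code_internal_spec : Claim_equal_get_hash_code_internal := by
  intro ints_list ints_len _ _
  unfold Spec_get_hash_code_internal get_hash_code_internal get_hash_code_internal_alt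
  obtain ⟨h1, h2⟩ := loop_eq ints_list ints_len (ints_len - 0).toNat 0 352654597 352654597 rfl
  rw [show (0:Int) + 1 = 1 by norm_num] at h2
  simp only
  rw [h1, h2]
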